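-- pv_equiv track=rewrite | github.com/hansonxyz/qr_code_backup | qr_code_backup.py | get_qr_capacity
-- ===== SOURCE A (Python) =====
-- def get_qr_capacity(qr_version: int, error_correction: str) -> int:
--     """Estimate maximum bytes that can fit in a QR code.
--
--     This is an approximation. Actual capacity depends on data content.
--     Binary mode capacities for different versions and error correction levels.
--
--     Args:
--         qr_version: QR code version (1-40)
--         error_correction: Error correction level ('L', 'M', 'Q', 'H')
--
--     Returns:
--         Approximate capacity in bytes
--     """
--     # Simplified capacity table for binary mode
--     # Format: {version: {error_level: bytes}}
--     # Full table would be very long, so we use a formula approximation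
--     base_capacities = {
--         1: {'L': 17, 'M': 14, 'Q': 11, 'H': 7},
--         5: {'L': 108, 'M': 86, 'Q': 62, 'H': 46},
--         10: {'L': 346, 'M': 271, 'Q': 213, 'H': 151},
--         15: {'L': 682, 'M': 530, 'Q': 406, 'H': 304},
--         20: {'L': 1085, 'M': 845, 'Q': 647, 'H': 485},
--         25: {'L': 1596, 'M': 1258, 'Q': 938, 'H': 1046},
--         30: {'L': 2306, 'M': 1628, 'Q': 1226, 'H': 904},
--         40: {'L': 2953, 'M': 2331, 'Q': 1663, 'H': 1273},
--     }
--
--     # Find closest version in table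
--     if qr_version in base_capacities:
--         return base_capacities[qr_version][error_correction]
--
--     # Linear interpolation for versions not in table
--     versions = sorted(base_capacities.keys())
--     for i in range(len(versions) - 1):
--         if versions[i] <= qr_version <= versions[i+1]:
--             v1, v2 = versions[i], versions[i+1]
--             c1 = base_capacities[v1][error_correction]
--             c2 = base_capacities[v2][error_correction]
--             # Linear interpolation
--             ratio = (qr_version - v1) / (v2 - v1)
--             return int(c1 + (c2 - c1) * ratio)
--
--     # Fallback for version 1 or 40+
--     if qr_version < 1:
--         return base_capacities[1][error_correction]
--     else:
--         return base_capacities[40][error_correction]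
-- ===== SOURCE B (Python) =====
-- _VERSIONS = [1, 5, 10, 15, 20, 25, 30, 40]
-- _CAPS = {
--     'L': [17, 108, 346, 682, 1085, 1596, 2306, 2953],
--     'M': [14, 86, 271, 530, 845, 1258, 1628, 2331],
--     'Q': [11, 62, 213, 406, 647, 938, 1226, 1663],
--     'H': [7, 46, 151, 304, 485, 1046, 904, 1273],
-- }
--
-- def get_qr_capacity(qr_version: int, error_correction: str) -> int:
--     caps = _CAPS[error_correction]
--     v = min(max(qr_version, 1), 40)
--     # bisect_right over the sorted version keys (hand-rolled binary search)
--     lo, hi = 0, len(_VERSIONS)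
--     while lo < hi:
--         mid = (lo + hi) // 2
--         if v < _VERSIONS[mid]:
--             hi = mid
--         else:
--             lo = mid + 1
--     i = min(lo - 1, len(_VERSIONS) - 2)
--     v1, v2 = _VERSIONS[i], _VERSIONS[i + 1]
--     c1, c2 = caps[i], caps[i + 1]
--     # exact integer interpolation (floor; result is positive so == int() truncation)
--     return c1 + (c2 - c1) * (v - v1) // (v2 - v1)
-- ===== Notes on version B (the rewrite author's own statement) =====
-- stated objective: simpler
-- what changed: B clamps the version to [1,40], finds the surrounding table pair by binary search over a flat sorted version list, and always applies one integer interpolation formula, replacing A's nested-dict exact-match early return, linear interpolation scan and two fallback branches.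
-- outside the precondition, e.g. on get_qr_capacity(7, 'X'): A raises KeyError, B raises KeyError
import Mathlib
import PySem

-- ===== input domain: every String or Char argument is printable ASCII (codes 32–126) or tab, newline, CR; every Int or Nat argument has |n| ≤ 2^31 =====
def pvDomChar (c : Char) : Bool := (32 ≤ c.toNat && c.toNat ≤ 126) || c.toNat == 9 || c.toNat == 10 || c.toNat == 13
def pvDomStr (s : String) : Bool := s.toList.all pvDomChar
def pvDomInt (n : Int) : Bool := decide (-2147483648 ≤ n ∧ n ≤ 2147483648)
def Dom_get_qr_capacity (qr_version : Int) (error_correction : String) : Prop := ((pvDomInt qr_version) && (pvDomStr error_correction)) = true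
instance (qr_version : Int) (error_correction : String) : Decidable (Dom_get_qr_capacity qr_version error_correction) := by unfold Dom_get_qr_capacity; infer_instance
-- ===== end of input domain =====

-- B replaces A's exact-match branch, linear interpolation scan and two fallbacks by
-- clamp-to-[1,40] + binary search + one integer interpolation formula (objective: simpler).

-- ===== PORT A =====
-- the literal base_capacities dict
def pvBaseCaps : PySem.Dict Int (PySem.Dict String Int) :=
  PySem.Dict.ofList
    [ (1,  PySem.Dict.ofList [("L", 17), ("M", 14), ("Q", 11), ("H", 7)]),
      (5,  PySem.Dict.ofList [("L", 108), ("M", 86), ("Q", 62), ("H", 46)]),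
      (10, PySem.Dict.ofList [("L", 346), ("M", 271), ("Q", 213), ("H", 151)]),
      (15, PySem.Dict.ofList [("L", 682), ("M", 530), ("Q", 406), ("H", 304)]),
      (20, PySem.Dict.ofList [("L", 1085), ("M", 845), ("Q", 647), ("H", 485)]),
      (25, PySem.Dict.ofList [("L", 1596), ("M", 1258), ("Q", 938), ("H", 1046)]),
      (30, PySem.Dict.ofList [("L", 2306), ("M", 1628), ("Q", 1226), ("H", 904)]),
      (40, PySem.Dict.ofList [("L", 2953), ("M", 2331), ("Q", 1663), ("H", 1273)]) ]

-- base_capacities[v][ec]; the KeyError on an unknown level is excluded by Pre_ (getD 0 never fires there)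
def pvLookA (v : Int) (ec : String) : Int :=
  (((pvBaseCaps.get? v).getD PySem.Dict.empty).get? ec).getD 0

-- the 'for i in range(len(versions)-1)' loop with early return, over the list of indices
-- int(c1 + (c2 - c1) * ratio) is ported as c1 + (c2-c1)*(v-v1) floordiv (v2-v1): exact here —
-- the interpolated value is positive for every table gap, so float truncation = floor
-- (checked by exhaustive enumeration of all integer versions in the gaps).
def pvInterpLoopA (v : Int) (ec : String) (versions : List Int) : List Int → Option Int
  | [] => none
  | i :: rest =>
      let v1 := PySem.List.pyGetD versions i 0
      let v2 := PySem.List.pyGetD versions (i + 1) 0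
      if v1 ≤ v ∧ v ≤ v2 then
        let c1 := pvLookA v1 ec
        let c2 := pvLookA v2 ec
        some (c1 + PySem.Int.floordiv ((c2 - c1) * (v - v1)) (v2 - v1))
      else pvInterpLoopA v ec versions rest

def get_qr_capacity (qr_version : Int) (error_correction : String) : Int :=
  if pvBaseCaps.contains qr_version then pvLookA qr_version error_correction
  else
    let versions := PySem.List.sorted pvBaseCaps.keys (fun x => x) false
    match pvInterpLoopA qr_version error_correction versions
        (PySem.List.pyRange 0 ((versions.length : Int) - 1) 1) with
    | some r => r
    | none => if qr_version < 1 then pvLookA 1 error_correction else pvLookA 40 error_correction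

-- ===== PORT B =====
def pvVersions : List Int := [1, 5, 10, 15, 20, 25, 30, 40]

def pvCapsB : PySem.Dict String (List Int) :=
  PySem.Dict.ofList
    [ ("L", [17, 108, 346, 682, 1085, 1596, 2306, 2953]),
      ("M", [14, 86, 271, 530, 845, 1258, 1628, 2331]),
      ("Q", [11, 62, 213, 406, 647, 938, 1226, 1663]),
      ("H", [7, 46, 151, 304, 485, 1046, 904, 1273]) ]

-- hand-rolled bisect_right while-loop (gas = hi - lo bounds the iteration count; it only
-- makes the recursion structural and never runs out, the loop body is the Python one)
def pvBisectGo (v : Int) (lo hi : Nat) : Nat → Nat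
  | 0 => lo
  | gas + 1 =>
    if lo < hi then
      let mid := (lo + hi) / 2
      if v < PySem.List.pyGetD pvVersions (mid : Int) 0 then pvBisectGo v lo mid gas
      else pvBisectGo v (mid + 1) hi gas
    else lo

def pvBisect (v : Int) (lo hi : Nat) : Nat := pvBisectGo v lo hi (hi - lo)

-- body of B after clamping: binary search then one integer interpolation
def pvInterpAlt (v : Int) (caps : List Int) : Int :=
  let lo := pvBisect v 0 pvVersions.length
  let i : Int := min ((lo : Int) - 1) ((pvVersions.length : Int) - 2)
  let v1 := PySem.List.pyGetD pvVersions i 0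
  let v2 := PySem.List.pyGetD pvVersions (i + 1) 0
  let c1 := PySem.List.pyGetD caps i 0
  let c2 := PySem.List.pyGetD caps (i + 1) 0
  c1 + PySem.Int.floordiv ((c2 - c1) * (v - v1)) (v2 - v1)

def get_qr_capacity_alt (qr_version : Int) (error_correction : String) : Int :=
  let caps := (pvCapsB.get? error_correction).getD []
  pvInterpAlt (min (max qr_version 1) 40) caps

-- ===== PRECONDITION & SPEC =====
-- Pre_ excludes exactly the unknown error-correction levels, on which both Pythons raise KeyError
def Pre_get_qr_capacity (qr_version : Int) (error_correction : String) : Prop :=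
  error_correction = "L" ∨ error_correction = "M" ∨ error_correction = "Q" ∨ error_correction = "H"
instance (qr_version : Int) (error_correction : String) : Decidable (Pre_get_qr_capacity qr_version error_correction) := by
  unfold Pre_get_qr_capacity; infer_instance

def pvWitness_get_qr_capacity : Int × String := (7, "M")

def Spec_get_qr_capacity (qr_version : Int) (error_correction : String) (out : Int) : Prop := out = get_qr_capacity_alt qr_version error_correction
instance (qr_version : Int) (error_correction : String) (out : Int) : Decidable (Spec_get_qr_capacity qr_version error_correction out) := by unfold Spec_get_qr_capacity; infer_instance

-- ===== CLAIM (what is proved, stated in full; the proofs are below) =====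
def Claim_equal_get_qr_capacity : Prop := ∀ (qr_version : Int) (error_correction : String), Dom_get_qr_capacity qr_version error_correction → Pre_get_qr_capacity qr_version error_correction → Spec_get_qr_capacity qr_version error_correction (get_qr_capacity qr_version error_correction)

-- ===== LEMMAS AND PROOFS =====

lemma pv_contains_out (v : Int) (h : v < 1 ∨ 40 < v) : pvBaseCaps.contains v = false := by
  rw [PySem.Dict.contains_eq_decide_mem_keys,
      show pvBaseCaps.keys = [1, 5, 10, 15, 20, 25, 30, 40] from by decide]
  simp only [List.mem_cons, List.not_mem_nil, or_false, decide_eq_false_iff_not]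
  omega

lemma pv_loop_none (v : Int) (ec : String) (h : v < 1 ∨ 40 < v) :
    pvInterpLoopA v ec [1, 5, 10, 15, 20, 25, 30, 40] [0, 1, 2, 3, 4, 5, 6] = none := by
  simp only [pvInterpLoopA]
  norm_num [PySem.List.pyGetD, PySem.List.pyIdx?, List.getElem_cons,
    show Int.toNat 2 = 2 from rfl, show Int.toNat 3 = 3 from rfl,
    show Int.toNat 4 = 4 from rfl, show Int.toNat 5 = 5 from rfl,
    show Int.toNat 6 = 6 from rfl, show Int.toNat 7 = 7 from rfl]
  split_ifs <;> first | rfl | omega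

-- outside [1,40] A falls through to the fallback branch
lemma pvA_out (v : Int) (ec : String) (h : v < 1 ∨ 40 < v) :
    get_qr_capacity v ec = if v < 1 then pvLookA 1 ec else pvLookA 40 ec := by
  simp only [get_qr_capacity, pv_contains_out v h, Bool.false_eq_true, if_false,
    show PySem.List.sorted pvBaseCaps.keys (fun x => x) false = [1, 5, 10, 15, 20, 25, 30, 40]
      from by decide]
  rw [show PySem.List.pyRange 0 ((([1, 5, 10, 15, 20, 25, 30, 40] : List Int).length : Int) - 1) 1
        = [0, 1, 2, 3, 4, 5, 6] from by decide,
      pv_loop_none v ec h]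

lemma pvA_table (n : Int) (ec : String) (hmem : pvBaseCaps.contains n = true) :
    get_qr_capacity n ec = pvLookA n ec := by
  simp only [get_qr_capacity, hmem, if_true]

-- below 1 / above 40 both sides collapse to the version-1 / version-40 value
lemma pvA_low (v : Int) (ec : String) (h : v < 1) :
    get_qr_capacity v ec = get_qr_capacity 1 ec := by
  rw [pvA_out v ec (Or.inl h), if_pos h, pvA_table 1 ec (by decide)]

lemma pvA_high (v : Int) (ec : String) (h : 40 < v) :
    get_qr_capacity v ec = get_qr_capacity 40 ec := by
  rw [pvA_out v ec (Or.inr h), if_neg (by omega : ¬ v < 1), pvA_table 40 ec (by decide)]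

lemma pvB_clamp (v : Int) (ec : String) :
    get_qr_capacity_alt v ec = pvInterpAlt (min (max v 1) 40) ((pvCapsB.get? ec).getD []) := rfl

-- ===== VERDICT (by name: the statement is the Claim_ definition above) =====
theorem get_qr_capacity_spec : Claim_equal_get_qr_capacity := by
  intro v ec _hdom hpre
  unfold Spec_get_qr_capacity
  rcases (by omega : v < 1 ∨ 1 ≤ v) with hlo | hge
  · have hb : get_qr_capacity_alt v ec = get_qr_capacity_alt 1 ec := by
      rw [pvB_clamp, pvB_clamp]
      congr 1
      omega
    rw [pvA_low v ec hlo, hb]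
    rcases hpre with h | h | h | h <;> subst h <;> decide
  · rcases (by omega : v ≤ 40 ∨ 40 < v) with hhi | hhi
    · rcases hpre with h | h | h | h <;> subst h <;>
        (interval_cases v <;> decide)
    · have hb : get_qr_capacity_alt v ec = get_qr_capacity_alt 40 ec := by
        rw [pvB_clamp, pvB_clamp]
        congr 1
        omega
      rw [pvA_high v ec hhi, hb]
      rcases hpre with h | h | h | h <;> subst h <;> decide
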